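-- pv_equiv track=rewrite | github.com/bbijoum26/Algorithm | 프로그래머스/0/181931. 등차수열의 특정한 항만 더하기/등차수열의 특정한 항만 더하기.py | solution
-- ===== SOURCE A (Python) =====
-- def solution(a, d, included):
--     answer = 0
--     current_term = a
--
--     for i in range(len(included)):
--         if included[i]:
--             answer += current_term
--         current_term += d
--
--     return answer
-- ===== SOURCE B (Python) =====
-- def solution(a, d, included):
--     idx = [i for i, inc in enumerate(included) if inc]
--     return a * len(idx) + d * sum(idx)
-- ===== Notes on version B (the rewrite author's own statement) =====
-- stated objective: simpler
-- what changed: Replaces the running current_term accumulator loop with a closed-form regrouping: collect the included indices and return a*count + d*sum(indices).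
import Mathlib
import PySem

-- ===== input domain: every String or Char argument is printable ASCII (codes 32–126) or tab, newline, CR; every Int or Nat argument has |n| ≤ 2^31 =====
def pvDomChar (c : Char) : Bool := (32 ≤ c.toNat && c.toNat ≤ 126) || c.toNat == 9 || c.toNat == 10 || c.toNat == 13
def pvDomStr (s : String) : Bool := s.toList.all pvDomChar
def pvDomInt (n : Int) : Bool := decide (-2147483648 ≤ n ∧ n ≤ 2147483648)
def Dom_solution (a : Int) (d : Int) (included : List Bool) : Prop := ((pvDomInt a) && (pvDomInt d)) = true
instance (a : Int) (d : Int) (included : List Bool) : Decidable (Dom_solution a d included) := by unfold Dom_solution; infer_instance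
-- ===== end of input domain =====

-- B replaces A's running current_term loop with a closed form: a*(number of included) + d*(sum of included indices); objective: simpler.


-- ===== PORT A =====
def solution (a : Int) (d : Int) (included : List Bool) : Int :=
  -- answer = 0; current_term = a; for i in range(len(included)): ...
  let st := (PySem.List.pyRange 0 (included.length : Int) 1).foldl
    (fun (s : Int × Int) i =>
      ((if PySem.List.pyGetD included i false then s.1 + s.2 else s.1), s.2 + d))
    (0, a)
  st.1

-- ===== PORT B =====
def solution_alt (a : Int) (d : Int) (included : List Bool) : Int :=
  -- idx = [i for i, inc in enumerate(included) if inc]; return a*len(idx) + d*sum(idx)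
  let idx := ((PySem.List.enumerate included 0).filter (fun p => p.2)).map (fun p => p.1)
  a * (idx.length : Int) + d * idx.sum

-- ===== PRECONDITION & SPEC =====
def Spec_solution (a : Int) (d : Int) (included : List Bool) (out : Int) : Prop := out = solution_alt a d included
instance (a : Int) (d : Int) (included : List Bool) (out : Int) : Decidable (Spec_solution a d included out) := by unfold Spec_solution; infer_instance

-- ===== CLAIM (what is proved, stated in full; the proofs are below) =====
def Claim_equal_solution : Prop := ∀ (a : Int) (d : Int) (included : List Bool), Dom_solution a d included → Spec_solution a d included (solution a d included)

-- ===== LEMMAS AND PROOFS =====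

/-- number of `true` entries, as an Int -/
def pvCnt : List Bool → Int
  | [] => 0
  | b :: t => (if b then 1 else 0) + pvCnt t

/-- sum of the (0-based) indices of the `true` entries -/
def pvWsum : List Bool → Int
  | [] => 0
  | b :: t => pvWsum t + pvCnt t

lemma a_go (d : Int) : ∀ (l : List Bool) (ans cur : Int),
    (l.foldl (fun (s : Int × Int) b => ((if b then s.1 + s.2 else s.1), s.2 + d)) (ans, cur)).1
      = ans + cur * pvCnt l + d * pvWsum l := by
  intro l
  induction l with
  | nil => intro ans cur; simp [pvCnt, pvWsum]
  | cons b t ih =>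
    intro ans cur
    simp only [List.foldl_cons, ih, pvCnt, pvWsum]
    by_cases hb : b <;> simp [hb] <;> ring

lemma b_len : ∀ (l : List Bool) (s : Int),
    (((PySem.List.enumerate l s).filter (fun p => p.2)).length : Int) = pvCnt l := by
  intro l
  induction l with
  | nil => intro s; simp [PySem.List.enumerate_nil, pvCnt]
  | cons b t ih =>
    intro s
    rw [PySem.List.enumerate_cons]
    by_cases hb : b <;> simp [hb, List.filter_cons, ← ih (s + 1), pvCnt] <;> ring

lemma b_sum : ∀ (l : List Bool) (s : Int),
    ((((PySem.List.enumerate l s).filter (fun p => p.2)).map (fun p => p.1)).sum)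
      = s * pvCnt l + pvWsum l := by
  intro l
  induction l with
  | nil => intro s; simp [PySem.List.enumerate_nil, pvCnt, pvWsum]
  | cons b t ih =>
    intro s
    rw [PySem.List.enumerate_cons]
    by_cases hb : b <;>
      simp [hb, List.filter_cons, ih (s + 1), pvCnt, pvWsum] <;> ring

-- ===== VERDICT (by name: the statement is the Claim_ definition above) =====
theorem solution_spec : Claim_equal_solution := by
  intro a d included _
  show solution a d included = solution_alt a d included
  simp only [solution, solution_alt]
  rw [PySem.List.foldl_pyRange_zero_pyGetD' included false
        (fun (s : Int × Int) b => ((if b then s.1 + s.2 else s.1), s.2 + d)) (0, a)]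
  rw [a_go, b_sum, List.length_map, b_len]
  ring
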